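-- pv_equiv track=rewrite | github.com/Naresh-Babu/advent-of-code | MirrorGround.py | part_two
-- ===== SOURCE A (Python) =====
-- def part_two(input_data):
-- 	patterns = input_data
-- 	total = 0
--
-- 	for x in patterns:
--
-- 		m,n = len(x), len(x[0])
--
-- 		max_row = 0
-- 		for i in range(1, m):
-- 			j = 1
-- 			cost = 0
-- 			while i-j >= 0 and i+j-1 < m :
-- 				cost +=	sum([int(x[i-j][k] != x[i+j-1][k]) for k in range(n)])
-- 				if cost > 1:
-- 					break
-- 				j+=1
-- 			else:
-- 				if cost == 1:
-- 					max_row = i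
--
--
-- 		t = []
--
-- 		for i in zip(*x):
-- 			t.append(list(i))
--
-- 		x = t
--
-- 		max_col = 0
-- 		for j in range(1, n):
-- 			i = 1
-- 			cost = 0
-- 			while j-i >= 0 and i+j-1 < n :
-- 				cost +=	sum([int(x[j-i][k] != x[i+j-1][k])for k in range(m)])
-- 				if cost > 1:
-- 					break
-- 				i+=1
-- 			else:
-- 				if cost == 1:
-- 					max_col = j
--
-- 		total += max_row*100 + max_col
--
--
-- 	return total
-- ===== SOURCE B (Python) =====
-- PLANES = 7  # inputs are ASCII (< 128), so 7 bit-planes encode a cell exactly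
--
--
-- def _row_planes(line):
--     return [sum(1 << c for c, ch in enumerate(line) if (ord(ch) >> b) & 1)
--             for b in range(PLANES)]
--
--
-- def _col_planes(lines, c):
--     return [sum(1 << r for r, line in enumerate(lines) if (ord(line[c]) >> b) & 1)
--             for b in range(PLANES)]
--
--
-- def _mirror_line(masks):
--     last = 0
--     for i in range(1, len(masks)):
--         total = 0
--         for j in range(1, min(i, len(masks) - i) + 1):
--             diff = 0
--             for b in range(PLANES):
--                 diff |= masks[i - j][b] ^ masks[i + j - 1][b]
--             total += bin(diff).count('1')
--         if total == 1:
--             last = i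
--     return last
--
--
-- def part_two(input_data):
--     total = 0
--     for p in input_data:
--         rows = [_row_planes(line) for line in p]
--         cols = [_col_planes(p, c) for c in range(len(p[0]))]
--         total += 100 * _mirror_line(rows) + _mirror_line(cols)
--     return total
-- ===== Notes on version B (the rewrite author's own statement) =====
-- stated objective: alternative
-- what changed: B pre-encodes the pattern as bitmask integers - 7 ASCII bit-plane masks per row and, built directly from the grid without transposing, per column - and scores each candidate mirror line by popcounts of OR-ed XORs of the paired masks over the full reflection (no expand-outward while loop with early break, no cell-by-cell comparison), keeping the last line with exactly one smudge.
-- outside the precondition, e.g. on part_two([['#', '##']]): A returns 0, B returns 100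
import Mathlib
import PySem

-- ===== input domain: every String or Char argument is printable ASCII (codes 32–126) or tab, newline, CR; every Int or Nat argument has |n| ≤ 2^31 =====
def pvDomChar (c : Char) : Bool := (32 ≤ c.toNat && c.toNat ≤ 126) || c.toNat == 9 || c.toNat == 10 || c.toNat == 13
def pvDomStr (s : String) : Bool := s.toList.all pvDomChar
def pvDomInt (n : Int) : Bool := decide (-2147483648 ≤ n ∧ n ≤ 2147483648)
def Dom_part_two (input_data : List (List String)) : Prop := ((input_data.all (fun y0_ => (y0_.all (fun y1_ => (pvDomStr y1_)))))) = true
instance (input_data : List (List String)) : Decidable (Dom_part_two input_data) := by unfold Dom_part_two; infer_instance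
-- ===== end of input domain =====

-- B replaces A's per-line expand-outward character scan over the grid (and its transposition)
-- by precomputed row/column bit-plane bitmask integers compared with XOR/OR + popcount
-- (objective: alternative).

-- ===== PORT A =====

-- sum([int(x[i-j][k] != x[i+j-1][k]) for k in range(n)])  (the two rows already looked up)
def rowDiffA (ra rb : List Char) (n : Int) : Int :=
  (PySem.List.pyRange 0 n 1).foldl
    (fun acc k => acc + (if PySem.List.pyGet? ra k ≠ PySem.List.pyGet? rb k then 1 else 0)) 0

-- the inner 'while i-j >= 0 and i+j-1 < m' loop; returns (cost, broke)
def whileA (x : List (List Char)) (m n i : Int) : Nat → Int → Int → Int × Bool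
  | 0, _, cost => (cost, false)
  | fuel+1, j, cost =>
    if 0 ≤ i - j ∧ i + j - 1 < m then
      let cost' := cost + rowDiffA ((PySem.List.pyGet? x (i-j)).getD [])
                                    ((PySem.List.pyGet? x (i+j-1)).getD []) n
      if cost' > 1 then (cost', true)
      else whileA x m n i fuel (j+1) cost'
    else (cost, false)

-- 'for i in range(1, m): … while … else: if cost == 1: max_row = i'
-- (the same code appears verbatim for the columns with (t, n, m))
def maxLineA (x : List (List Char)) (m n : Int) : Int :=
  (PySem.List.pyRange 1 m 1).foldl
    (fun acc i =>
      let r := whileA x m n i (m.natAbs + 2) 1 0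
      if r.2 = false ∧ r.1 = 1 then i else acc) 0

-- zip(*x): columns, truncated at the first exhausted row
def zipStar (x : List (List Char)) : List (List Char) :=
  if _h : x.isEmpty ∨ x.any (·.isEmpty) then []
  else x.map (fun r => r.headD ' ') :: zipStar (x.map (·.tail))
termination_by (x.headD []).length
decreasing_by
  cases x with
  | nil => exact absurd (Or.inl rfl) _h
  | cons r rs =>
    cases r with
    | nil => exact absurd (Or.inr (by simp)) _h
    | cons c cs => simp

def part_two (input_data : List (List String)) : Int :=
  input_data.foldl
    (fun total p =>
      let x := p.map String.toList
      let m : Int := x.length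
      let n : Int := ((x.headD []).length : Int)
      let maxRow := maxLineA x m n
      let t := zipStar x
      let maxCol := maxLineA t n m
      total + (maxRow * 100 + maxCol)) 0

-- ===== PORT B =====

-- truthiness of (ord(ch) >> b) & 1
def planeBit (ch : Char) (b : Int) : Bool :=
  PySem.Int.band ((ch.toNat : Int) >>> b.toNat) 1 != 0

-- [sum(1 << c for c, ch in enumerate(line) if (ord(ch) >> b) & 1) for b in range(PLANES)]
def rowPlanes (line : List Char) : List Int :=
  (PySem.List.pyRange 0 7 1).map (fun b =>
    (((PySem.List.enumerate line).filter (fun q => planeBit q.2 b)).map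
      (fun q => Int.shiftLeft 1 q.1.toNat)).sum)

-- [sum(1 << r for r, line in enumerate(lines) if (ord(line[c]) >> b) & 1) for b in range(PLANES)]
def colPlanes (x : List (List Char)) (c : Int) : List Int :=
  (PySem.List.pyRange 0 7 1).map (fun b =>
    (((PySem.List.enumerate x).filter (fun q => planeBit (PySem.List.pyGetD q.2 c ' ') b)).map
      (fun q => Int.shiftLeft 1 q.1.toNat)).sum)

-- diff = 0; for b in range(PLANES): diff |= m1[b] ^ m2[b]
def diffPlanes (m1 m2 : List Int) : Int :=
  (PySem.List.pyRange 0 7 1).foldl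
    (fun acc b => PySem.Int.bor acc (PySem.Int.bxor
      (PySem.List.pyGetD m1 b 0) (PySem.List.pyGetD m2 b 0))) 0

-- total += bin(diff).count('1') over the full reflection at line i
def smudgesB (masks : List (List Int)) (i : Int) : Int :=
  (PySem.List.pyRange 1 (min i ((masks.length : Int) - i) + 1) 1).foldl
    (fun acc j => acc + (PySem.Int.bitCount (diffPlanes
        (PySem.List.pyGetD masks (i - j) []) (PySem.List.pyGetD masks (i + j - 1) [])) : Int)) 0

-- _mirror_line(masks): last i in range(1, len(masks)) with exactly one smudge
def mirrorLineB (masks : List (List Int)) : Int :=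
  (PySem.List.pyRange 1 (masks.length : Int) 1).foldl
    (fun last i => if smudgesB masks i = 1 then i else last) 0

def part_two_alt (input_data : List (List String)) : Int :=
  input_data.foldl
    (fun total p =>
      let x := p.map String.toList
      let rows := x.map rowPlanes
      let cols := (PySem.List.pyRange 0 ((x.headD []).length : Int) 1).map (colPlanes x)
      total + (100 * mirrorLineB rows + mirrorLineB cols)) 0

-- ===== PRECONDITION & SPEC =====
-- Pre_ restricts to the function's natural domain (Advent-of-Code mirror patterns): every
-- pattern is a NONEMPTY RECTANGULAR grid.  A raises IndexError on empty patterns and on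
-- ragged patterns whose first row is not the shortest; on the remaining ragged patterns
-- A's value depends on truncating every row to the first row's length, an accident of the
-- n = len(x[0]) bound that no caller relies on, so those are excluded too.
def Pre_part_two (input_data : List (List String)) : Prop :=
  ∀ p ∈ input_data, p ≠ [] ∧ ∀ s ∈ p,
    s.toList.length = ((p.headD "").toList).length
instance (input_data : List (List String)) : Decidable (Pre_part_two input_data) := by
  unfold Pre_part_two; infer_instance

def pvWitness_part_two : List (List String) := [["#.", "##", "##", ".."]]

def Spec_part_two (input_data : List (List String)) (out : Int) : Prop := out = part_two_alt input_data
instance (input_data : List (List String)) (out : Int) : Decidable (Spec_part_two input_data out) := by unfold Spec_part_two; infer_instance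

-- ===== CLAIM (what is proved, stated in full; the proofs are below) =====
def Claim_equal_part_two : Prop := ∀ (input_data : List (List String)), Dom_part_two input_data → Pre_part_two input_data → Spec_part_two input_data (part_two input_data)

-- ===== LEMMAS AND PROOFS =====

-- hamming distance of two equal-length rows, structurally
def ham : List Char → List Char → Int
  | a :: as, b :: bs => (if a ≠ b then 1 else 0) + ham as bs
  | _, _ => 0

-- the binary value of a row under a bit-valued predicate, read low-bit-first
def maskAuxP (p : Char → Bool) : List Char → Int
  | [] => 0
  | a :: l => (if p a then 1 else 0) + 2 * maskAuxP p l

-- the mismatch indicator mask of two rows, read low-bit-first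
def maskAux2 : List Char → List Char → Int
  | a :: as, b :: bs => (if a ≠ b then 1 else 0) + 2 * maskAux2 as bs
  | _, _ => 0

-- one bit plane of a row
def planeOf (b : Int) (l : List Char) : Int := maskAuxP (fun ch => planeBit ch b) l

-- bit b of a character code
def bitb (a : Char) (k : Nat) : Nat := (a.toNat >>> k) % 2

theorem ham_cons (a b : Char) (as bs : List Char) :
    ham (a :: as) (b :: bs) = (if a ≠ b then 1 else 0) + ham as bs := rfl

theorem maskAuxP_cons (p : Char → Bool) (a : Char) (l : List Char) :
    maskAuxP p (a :: l) = (if p a then 1 else 0) + 2 * maskAuxP p l := rfl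

theorem maskAux2_cons (a b : Char) (as bs : List Char) :
    maskAux2 (a :: as) (b :: bs) = (if a ≠ b then 1 else 0) + 2 * maskAux2 as bs := rfl

theorem maskAuxP_nonneg (p : Char → Bool) (l : List Char) : 0 ≤ maskAuxP p l := by
  induction l with
  | nil => simp [maskAuxP]
  | cons a l ih => rw [maskAuxP_cons]; split <;> omega

theorem planeOf_nonneg (b : Int) (l : List Char) : 0 ≤ planeOf b l :=
  maskAuxP_nonneg _ l

theorem maskAux2_nonneg (as : List Char) : ∀ (bs : List Char), 0 ≤ maskAux2 as bs := by
  induction as with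
  | nil => intro bs; simp [maskAux2]
  | cons a l ih =>
    intro bs
    cases bs with
    | nil => simp [maskAux2]
    | cons b bs => have := ih bs; rw [maskAux2_cons]; split <;> omega

theorem sum_ham_aux (ra : List Char) : ∀ (rb : List Char), ra.length = rb.length →
    ((List.range ra.length).map (fun k => if ra[k]? ≠ rb[k]? then (1 : Int) else 0)).sum
      = ham ra rb := by
  induction ra with
  | nil => intro rb h; simp [ham]
  | cons a as ih =>
    intro rb h
    cases rb with
    | nil => simp at h
    | cons b bs =>
      have hlen : as.length = bs.length := by simpa using h
      rw [List.length_cons, List.range_succ_eq_map, List.map_cons, List.map_map, List.sum_cons]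
      have htail : (List.map ((fun k => if (a :: as)[k]? ≠ (b :: bs)[k]? then (1 : Int) else 0)
          ∘ Nat.succ) (List.range as.length)).sum = ham as bs := by
        rw [← ih bs hlen]
        apply congrArg List.sum
        apply List.map_congr_left
        intro k _
        simp
      have hhead : (if (a :: as)[0]? ≠ (b :: bs)[0]? then (1 : Int) else 0)
          = (if a ≠ b then 1 else 0) := by simp
      rw [htail, hhead, ham_cons]

theorem rowDiffA_eq_ham (ra rb : List Char) (h : ra.length = rb.length) :
    rowDiffA ra rb (ra.length : Int) = ham ra rb := by
  unfold rowDiffA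
  rw [PySem.List.foldl_add, PySem.List.pyRange_zero_nat, List.map_map, zero_add]
  rw [← sum_ham_aux ra rb h]
  apply congrArg List.sum
  apply List.map_congr_left
  intro k _
  simp [PySem.List.pyGet?_natCast]

theorem rowDiffA_nonneg (ra rb : List Char) (n : Int) : 0 ≤ rowDiffA ra rb n := by
  unfold rowDiffA
  rw [PySem.List.foldl_add]
  have : 0 ≤ (((PySem.List.pyRange 0 n 1).map
      (fun k => if PySem.List.pyGet? ra k ≠ PySem.List.pyGet? rb k then (1:Int) else 0))).sum := by
    apply List.sum_nonneg
    intro x hx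
    simp only [List.mem_map] at hx
    obtain ⟨k, _, rfl⟩ := hx
    split <;> omega
  omega

theorem int_shiftLeft_one (k : Nat) : Int.shiftLeft 1 k = 2 ^ k := by
  rw [show Int.shiftLeft 1 k = (1 : Int) <<< k from rfl, Int.shiftLeft_eq]
  ring

theorem maskP_shift (p : Char → Bool) (l : List Char) : ∀ (s : Nat),
    (((PySem.List.enumerate l (s : Int)).filter (fun q => p q.2)).map
      (fun q => Int.shiftLeft 1 q.1.toNat)).sum = 2 ^ s * maskAuxP p l := by
  induction l with
  | nil => intro s; simp [PySem.List.enumerate, maskAuxP]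
  | cons a l ih =>
    intro s
    rw [PySem.List.enumerate_cons]
    have hcast : ((s : Int) + 1) = ((s + 1 : Nat) : Int) := by push_cast; ring
    rw [hcast]
    by_cases ha : p a
    · rw [List.filter_cons_of_pos (by simpa using ha), List.map_cons, List.sum_cons, ih (s + 1),
        int_shiftLeft_one, Int.toNat_natCast, maskAuxP_cons, if_pos ha]
      ring
    · rw [List.filter_cons_of_neg (by simpa using ha), ih (s + 1), maskAuxP_cons, if_neg ha]
      ring

theorem rowPlanes_eq (line : List Char) :
    rowPlanes line = (PySem.List.pyRange 0 7 1).map (fun b => planeOf b line) := by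
  unfold rowPlanes planeOf
  apply List.map_congr_left
  intro b _
  simpa using maskP_shift (fun ch => planeBit ch b) line 0

theorem enumerate_map {α β : Type} (f : α → β) (x : List α) : ∀ (s : Int),
    PySem.List.enumerate (x.map f) s = (PySem.List.enumerate x s).map (fun q => (q.1, f q.2)) := by
  induction x with
  | nil => intro s; simp [PySem.List.enumerate]
  | cons a l ih =>
    intro s
    rw [List.map_cons, PySem.List.enumerate_cons, PySem.List.enumerate_cons, List.map_cons, ih]

theorem colPlanes_eq_rowPlanes (x : List (List Char)) (c : Nat) :
    colPlanes x (c : Int) = rowPlanes (x.map (fun r => r.getD c ' ')) := by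
  unfold colPlanes rowPlanes
  apply List.map_congr_left
  intro b _
  rw [enumerate_map, List.filter_map, List.map_map]
  simp only [Function.comp_def, PySem.List.pyGetD_natCast]

-- ---- bit-level facts ----

theorem nat_xor_split (da db : Bool) (a b : Nat) :
    (2 * a + da.toNat) ^^^ (2 * b + db.toNat) = 2 * (a ^^^ b) + (da ^^ db).toNat := by
  have := Nat.xor_bit da a db b
  simpa [Nat.bit_val, Nat.mul_comm] using this

theorem nat_lor_split (da db : Bool) (a b : Nat) :
    (2 * a + da.toNat) ||| (2 * b + db.toNat) = 2 * (a ||| b) + (da || db).toNat := by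
  have := Nat.lor_bit da a db b
  simpa [Nat.bit_val, Nat.mul_comm] using this

theorem bxor_nonneg (a b : Int) (ha : 0 ≤ a) (hb : 0 ≤ b) : 0 ≤ PySem.Int.bxor a b := by
  rw [PySem.Int.bxor_of_nonneg ha hb]
  exact Int.natCast_nonneg _

theorem bor_nonneg (a b : Int) (ha : 0 ≤ a) (hb : 0 ≤ b) : 0 ≤ PySem.Int.bor a b := by
  rw [PySem.Int.bor_of_nonneg ha hb]
  exact Int.natCast_nonneg _

theorem int_bxor_split (d1 d2 c1 c2 : Int) (h1 : d1 = 0 ∨ d1 = 1) (h2 : d2 = 0 ∨ d2 = 1)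
    (hc1 : 0 ≤ c1) (hc2 : 0 ≤ c2) :
    PySem.Int.bxor (d1 + 2 * c1) (d2 + 2 * c2)
      = (if d1 = d2 then 0 else 1) + 2 * PySem.Int.bxor c1 c2 := by
  rw [PySem.Int.bxor_of_nonneg (by omega) (by omega), PySem.Int.bxor_of_nonneg hc1 hc2]
  rcases h1 with rfl | rfl <;> rcases h2 with rfl | rfl
  · rw [show (0 + 2*c1).toNat = 2 * c1.toNat + (false : Bool).toNat by simp; omega,
        show (0 + 2*c2).toNat = 2 * c2.toNat + (false : Bool).toNat by simp; omega,
        nat_xor_split]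
    push_cast
    simp
    try ring
  · rw [show (0 + 2*c1).toNat = 2 * c1.toNat + (false : Bool).toNat by simp; omega,
        show (1 + 2*c2).toNat = 2 * c2.toNat + (true : Bool).toNat by simp; omega,
        nat_xor_split]
    push_cast
    simp
    try ring
  · rw [show (1 + 2*c1).toNat = 2 * c1.toNat + (true : Bool).toNat by simp; omega,
        show (0 + 2*c2).toNat = 2 * c2.toNat + (false : Bool).toNat by simp; omega,
        nat_xor_split]
    push_cast
    simp
    try ring
  · rw [show (1 + 2*c1).toNat = 2 * c1.toNat + (true : Bool).toNat by simp; omega,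
        show (1 + 2*c2).toNat = 2 * c2.toNat + (true : Bool).toNat by simp; omega,
        nat_xor_split]
    push_cast
    simp
    try ring

theorem int_bor_split (d1 d2 c1 c2 : Int) (h1 : d1 = 0 ∨ d1 = 1) (h2 : d2 = 0 ∨ d2 = 1)
    (hc1 : 0 ≤ c1) (hc2 : 0 ≤ c2) :
    PySem.Int.bor (d1 + 2 * c1) (d2 + 2 * c2)
      = max d1 d2 + 2 * PySem.Int.bor c1 c2 := by
  rw [PySem.Int.bor_of_nonneg (by omega) (by omega), PySem.Int.bor_of_nonneg hc1 hc2]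
  rcases h1 with rfl | rfl <;> rcases h2 with rfl | rfl
  · rw [show (0 + 2*c1).toNat = 2 * c1.toNat + (false : Bool).toNat by simp; omega,
        show (0 + 2*c2).toNat = 2 * c2.toNat + (false : Bool).toNat by simp; omega,
        nat_lor_split]
    push_cast
    simp
    try ring
  · rw [show (0 + 2*c1).toNat = 2 * c1.toNat + (false : Bool).toNat by simp; omega,
        show (1 + 2*c2).toNat = 2 * c2.toNat + (true : Bool).toNat by simp; omega,
        nat_lor_split]
    push_cast
    simp
    try ring
  · rw [show (1 + 2*c1).toNat = 2 * c1.toNat + (true : Bool).toNat by simp; omega,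
        show (0 + 2*c2).toNat = 2 * c2.toNat + (false : Bool).toNat by simp; omega,
        nat_lor_split]
    push_cast
    simp
    try ring
  · rw [show (1 + 2*c1).toNat = 2 * c1.toNat + (true : Bool).toNat by simp; omega,
        show (1 + 2*c2).toNat = 2 * c2.toNat + (true : Bool).toNat by simp; omega,
        nat_lor_split]
    push_cast
    simp
    try ring

theorem bitCount_split (d : Nat) (hd : d < 2) (C : Int) (hC : 0 ≤ C) :
    PySem.Int.bitCount ((d : Int) + 2 * C) = d + PySem.Int.bitCount C := by
  by_cases h0 : (d : Int) + 2 * C = 0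
  · have hd0 : d = 0 := by omega
    have hC0 : C = 0 := by omega
    simp [hd0, hC0]
  · have hpos : 0 < (d : Int) + 2 * C := by omega
    rw [PySem.Int.bitCount_of_pos hpos,
        PySem.Int.mod_eq_emod_of_pos (by omega : (0:Int) < 2),
        PySem.Int.floordiv_eq_ediv_of_pos (by omega : (0:Int) < 2)]
    have h1 : ((d : Int) + 2 * C) % 2 = d := by omega
    have h2 : ((d : Int) + 2 * C) / 2 = C := by omega
    rw [h1, h2]
    omega

theorem ham_eq_bitCount2 (ra : List Char) : ∀ (rb : List Char), ra.length = rb.length →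
    ham ra rb = (PySem.Int.bitCount (maskAux2 ra rb) : Int) := by
  induction ra with
  | nil =>
    intro rb h
    cases rb with
    | nil => simp [ham, maskAux2]
    | cons b bs => simp at h
  | cons a as ih =>
    intro rb h
    cases rb with
    | nil => simp at h
    | cons b bs =>
      have hlen : as.length = bs.length := by simpa using h
      rw [ham_cons, maskAux2_cons, ih bs hlen]
      have hd : (if a ≠ b then (1:Int) else 0) = ((if a ≠ b then 1 else 0 : Nat) : Int) := by
        split <;> simp
      rw [hd, bitCount_split _ (by split <;> omega) _ (maskAux2_nonneg as bs)]
      push_cast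
      ring

-- ---- the 7-plane OR of XORs is the mismatch mask ----

theorem bitb_div (a : Char) (k : Nat) : bitb a k = a.toNat / 2 ^ k % 2 := by
  unfold bitb
  rw [Nat.shiftRight_eq_div_pow]

theorem planeBit_eq (a : Char) (b : Int) :
    (if planeBit a b then (1:Int) else 0) = ((bitb a b.toNat : Nat) : Int) := by
  unfold planeBit bitb
  rw [show ((a.toNat : Int) >>> b.toNat) = ((a.toNat >>> b.toNat : Nat) : Int) from rfl,
      PySem.Int.band_one,
      show PySem.Int.mod ((a.toNat >>> b.toNat : Nat) : Int) 2
        = ((a.toNat >>> b.toNat % 2 : Nat) : Int) by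
        rw [PySem.Int.mod_eq_emod_of_pos (by omega)]; omega]
  rcases Nat.mod_two_eq_zero_or_one (a.toNat >>> b.toNat) with h | h <;> simp [h]

theorem char_eq_of_bits (a1 a2 : Char) (h1 : a1.toNat < 128) (h2 : a2.toNat < 128)
    (hb : ∀ k, k < 7 → bitb a1 k = bitb a2 k) : a1 = a2 := by
  have e0 := hb 0 (by omega)
  have e1 := hb 1 (by omega)
  have e2 := hb 2 (by omega)
  have e3 := hb 3 (by omega)
  have e4 := hb 4 (by omega)
  have e5 := hb 5 (by omega)
  have e6 := hb 6 (by omega)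
  simp only [bitb_div] at e0 e1 e2 e3 e4 e5 e6
  norm_num at e0 e1 e2 e3 e4 e5 e6
  have : a1.toNat = a2.toNat := by omega
  exact Char.ext (UInt32.toNat_inj.mp this)

theorem foldl_max01 (bs : List Int) (d : Int → Int) (hd : ∀ b ∈ bs, d b = 0 ∨ d b = 1) :
    ∀ e : Int, e = 0 ∨ e = 1 →
      (bs.foldl (fun acc b => max acc (d b)) e = 0 ∨
        bs.foldl (fun acc b => max acc (d b)) e = 1) ∧
      (bs.foldl (fun acc b => max acc (d b)) e = 0 ↔ e = 0 ∧ ∀ b ∈ bs, d b = 0) := by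
  induction bs with
  | nil => intro e he; simpa using he
  | cons b0 bs ih =>
    intro e he
    have hd0 := hd b0 List.mem_cons_self
    have hdt : ∀ b ∈ bs, d b = 0 ∨ d b = 1 := fun b hb => hd b (List.mem_cons_of_mem _ hb)
    have he' : max e (d b0) = 0 ∨ max e (d b0) = 1 := by
      rcases he with rfl | rfl <;> rcases hd0 with h | h <;> simp [h]
    obtain ⟨h01, hiff⟩ := ih hdt (max e (d b0)) he'
    simp only [List.foldl_cons]
    refine ⟨h01, ?_⟩
    rw [hiff]
    constructor
    · rintro ⟨hm, hall⟩
      have : e = 0 ∧ d b0 = 0 := by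
        constructor <;> omega
      exact ⟨this.1, by
        intro b hb
        rcases List.mem_cons.1 hb with rfl | hb
        · exact this.2
        · exact hall b hb⟩
    · rintro ⟨he0, hall⟩
      have hb0 : d b0 = 0 := hall b0 List.mem_cons_self
      exact ⟨by rw [he0, hb0]; simp, fun b hb => hall b (List.mem_cons_of_mem _ hb)⟩

theorem foldl_bor_split (bs : List Int) (u v : Int → Int)
    (hu : ∀ b ∈ bs, u b = 0 ∨ u b = 1) (hv : ∀ b ∈ bs, 0 ≤ v b) :
    ∀ (e a : Int), e = 0 ∨ e = 1 → 0 ≤ a →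
    bs.foldl (fun acc b => PySem.Int.bor acc (u b + 2 * v b)) (e + 2 * a)
      = bs.foldl (fun acc b => max acc (u b)) e
        + 2 * bs.foldl (fun acc b => PySem.Int.bor acc (v b)) a := by
  induction bs with
  | nil => intro e a _ _; simp
  | cons b0 bs ih =>
    intro e a he ha
    have hu0 := hu b0 List.mem_cons_self
    have hv0 := hv b0 List.mem_cons_self
    simp only [List.foldl_cons]
    rw [int_bor_split e (u b0) a (v b0) he hu0 ha hv0]
    exact ih (fun b hb => hu b (List.mem_cons_of_mem _ hb))
      (fun b hb => hv b (List.mem_cons_of_mem _ hb))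
      (max e (u b0)) (PySem.Int.bor a (v b0))
      (by rcases he with rfl | rfl <;> rcases hu0 with h | h <;> simp [h])
      (bor_nonneg _ _ ha hv0)

theorem head_fold_eq (a1 a2 : Char) (h1 : a1.toNat < 128) (h2 : a2.toNat < 128) :
    (PySem.List.pyRange 0 7 1).foldl
      (fun acc b => max acc (if (if planeBit a1 b then (1:Int) else 0)
        = (if planeBit a2 b then (1:Int) else 0) then (0:Int) else 1)) (0:Int)
    = (if a1 ≠ a2 then (1:Int) else 0) := by
  have hd : ∀ b ∈ PySem.List.pyRange 0 7 1,
      (if (if planeBit a1 b then (1:Int) else 0)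
        = (if planeBit a2 b then (1:Int) else 0) then (0:Int) else 1) = 0 ∨
      (if (if planeBit a1 b then (1:Int) else 0)
        = (if planeBit a2 b then (1:Int) else 0) then (0:Int) else 1) = 1 := by
    intro b _
    split <;> simp
  obtain ⟨h01, hiff⟩ := foldl_max01 (PySem.List.pyRange 0 7 1)
    (fun b => (if (if planeBit a1 b then (1:Int) else 0)
      = (if planeBit a2 b then (1:Int) else 0) then (0:Int) else 1)) hd 0 (Or.inl rfl)
  by_cases heq : a1 = a2
  · subst heq
    have hz : (if a1 ≠ a1 then (1:Int) else 0) = 0 := by simp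
    exact (hiff.2 ⟨rfl, by intro b _; simp⟩).trans hz.symm
  · rw [if_pos heq]
    rcases h01 with h0 | h1'
    · exfalso
      obtain ⟨_, hall⟩ := hiff.1 h0
      apply heq
      apply char_eq_of_bits a1 a2 h1 h2
      intro k hk
      have hkmem : ((k : Int)) ∈ PySem.List.pyRange 0 7 1 := by
        rw [PySem.List.mem_pyRange_one]
        omega
      have := hall (k : Int) hkmem
      rw [planeBit_eq, planeBit_eq, Int.toNat_natCast] at this
      by_contra hne
      rw [if_neg (by exact_mod_cast hne)] at this
      exact one_ne_zero this
    · exact h1'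

theorem diffPlanes_red (r1 r2 : List Char) :
    diffPlanes (rowPlanes r1) (rowPlanes r2)
      = (PySem.List.pyRange 0 7 1).foldl
          (fun acc b => PySem.Int.bor acc (PySem.Int.bxor (planeOf b r1) (planeOf b r2))) 0 := by
  unfold diffPlanes
  rw [rowPlanes_eq r1, rowPlanes_eq r2]
  apply PySem.List.foldl_congr_mem
  intro acc b hb
  rw [PySem.List.mem_pyRange_one] at hb
  rw [PySem.List.pyGetD_map_pyRange_of_nonneg _ 7 b 0 hb.1 hb.2,
      PySem.List.pyGetD_map_pyRange_of_nonneg _ 7 b 0 hb.1 hb.2]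

theorem fold_or_xor_eq_maskAux2 (r1 : List Char) : ∀ (r2 : List Char),
    r1.length = r2.length →
    (∀ ch ∈ r1, ch.toNat < 128) → (∀ ch ∈ r2, ch.toNat < 128) →
    (PySem.List.pyRange 0 7 1).foldl
        (fun acc b => PySem.Int.bor acc (PySem.Int.bxor (planeOf b r1) (planeOf b r2))) 0
      = maskAux2 r1 r2 := by
  induction r1 with
  | nil =>
    intro r2 h _ _
    cases r2 with
    | nil =>
      rw [PySem.List.foldl_congr_mem (PySem.List.pyRange 0 7 1)
          (fun acc b => PySem.Int.bor acc (PySem.Int.bxor (planeOf b ([] : List Char)) (planeOf b ([] : List Char))))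
          (fun acc _ => acc) 0
          (by intro acc b _; simp [planeOf, maskAuxP, PySem.Int.bor_zero]),
        PySem.List.foldl_ignore]
      simp [maskAux2]
    | cons b bs => simp at h
  | cons a1 t1 ih =>
    intro r2 h ha1 ha2
    cases r2 with
    | nil => simp at h
    | cons a2 t2 =>
      have hlen : t1.length = t2.length := by simpa using h
      have hstep : ∀ (acc b : Int), b ∈ PySem.List.pyRange 0 7 1 →
          PySem.Int.bor acc (PySem.Int.bxor (planeOf b (a1 :: t1)) (planeOf b (a2 :: t2)))
            = PySem.Int.bor acc
                ((if (if planeBit a1 b then (1:Int) else 0)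
                    = (if planeBit a2 b then (1:Int) else 0) then 0 else 1)
                  + 2 * PySem.Int.bxor (planeOf b t1) (planeOf b t2)) := by
        intro acc b _
        rw [show planeOf b (a1 :: t1)
              = (if planeBit a1 b then (1:Int) else 0) + 2 * planeOf b t1 from rfl,
            show planeOf b (a2 :: t2)
              = (if planeBit a2 b then (1:Int) else 0) + 2 * planeOf b t2 from rfl,
            int_bxor_split _ _ _ _ (by split <;> simp) (by split <;> simp)
              (planeOf_nonneg b t1) (planeOf_nonneg b t2)]
      rw [PySem.List.foldl_congr_mem (PySem.List.pyRange 0 7 1)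
          (fun acc b => PySem.Int.bor acc
            (PySem.Int.bxor (planeOf b (a1 :: t1)) (planeOf b (a2 :: t2))))
          (fun acc b => PySem.Int.bor acc
            ((if (if planeBit a1 b then (1:Int) else 0)
                = (if planeBit a2 b then (1:Int) else 0) then 0 else 1)
              + 2 * PySem.Int.bxor (planeOf b t1) (planeOf b t2))) 0 hstep]
      have hsplit := foldl_bor_split (PySem.List.pyRange 0 7 1)
        (fun b => (if (if planeBit a1 b then (1:Int) else 0)
            = (if planeBit a2 b then (1:Int) else 0) then (0:Int) else 1))
        (fun b => PySem.Int.bxor (planeOf b t1) (planeOf b t2))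
        (by intro b _; dsimp only; split <;> simp)
        (by intro b _; exact bxor_nonneg _ _ (planeOf_nonneg b t1) (planeOf_nonneg b t2))
        0 0 (Or.inl rfl) le_rfl
      beta_reduce at hsplit
      rw [show (0:Int) + 2 * 0 = 0 by ring] at hsplit
      rw [hsplit,
        head_fold_eq a1 a2 (ha1 a1 List.mem_cons_self) (ha2 a2 List.mem_cons_self),
        ih t2 hlen (fun ch hch => ha1 ch (List.mem_cons_of_mem _ hch))
          (fun ch hch => ha2 ch (List.mem_cons_of_mem _ hch)),
        maskAux2_cons]

theorem diffPlanes_eq (r1 r2 : List Char) (h : r1.length = r2.length)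
    (ha1 : ∀ ch ∈ r1, ch.toNat < 128) (ha2 : ∀ ch ∈ r2, ch.toNat < 128) :
    diffPlanes (rowPlanes r1) (rowPlanes r2) = maskAux2 r1 r2 := by
  rw [diffPlanes_red]
  exact fold_or_xor_eq_maskAux2 r1 r2 h ha1 ha2

-- ---- the A-side while loop accepted iff the FULL reflection mismatch sum is 1 ----

theorem whileA_stop (x : List (List Char)) (m n i : Int) (fuel : Nat) (j c : Int)
    (hg : ¬ (0 ≤ i - j ∧ i + j - 1 < m)) :
    whileA x m n i (fuel + 1) j c = (c, false) := by
  simp only [whileA, if_neg hg]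

theorem whileA_step (x : List (List Char)) (m n i : Int) (fuel : Nat) (j c : Int)
    (hg : 0 ≤ i - j ∧ i + j - 1 < m) :
    whileA x m n i (fuel + 1) j c =
      (if c + rowDiffA ((PySem.List.pyGet? x (i - j)).getD [])
              ((PySem.List.pyGet? x (i + j - 1)).getD []) n > 1
       then (c + rowDiffA ((PySem.List.pyGet? x (i - j)).getD [])
              ((PySem.List.pyGet? x (i + j - 1)).getD []) n, true)
       else whileA x m n i fuel (j + 1)
              (c + rowDiffA ((PySem.List.pyGet? x (i - j)).getD [])
                ((PySem.List.pyGet? x (i + j - 1)).getD []) n)) := by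
  simp only [whileA, if_pos hg]

theorem whileA_char (x : List (List Char)) (n i : Int) :
    ∀ (fuel : Nat) (j c : Int), 1 ≤ j → 0 ≤ c → (min i ((x.length : Int) - i) + 1 - j).toNat < fuel →
      (((whileA x (x.length : Int) n i fuel j c).2 = false ∧
       (whileA x (x.length : Int) n i fuel j c).1 = 1) ↔
      c + ((PySem.List.pyRange j (min i ((x.length : Int) - i) + 1) 1).map
            (fun t => rowDiffA ((PySem.List.pyGet? x (i - t)).getD [])
                               ((PySem.List.pyGet? x (i + t - 1)).getD []) n)).sum = 1) := by
  intro fuel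
  induction fuel with
  | zero => intro j c _ _ h3; exact absurd h3 (Nat.not_lt_zero _)
  | succ fuel ih =>
    intro j c hj1 hc hfuel
    by_cases hj : j ≤ min i ((x.length : Int) - i)
    · rw [whileA_step _ _ _ _ _ _ _ ⟨by omega, by omega⟩,
        PySem.List.pyRange_one_cons (by omega), List.map_cons, List.sum_cons]
      have hdnn := rowDiffA_nonneg ((PySem.List.pyGet? x (i - j)).getD [])
        ((PySem.List.pyGet? x (i + j - 1)).getD []) n
      have htail : 0 ≤ ((PySem.List.pyRange (j + 1) (min i ((x.length : Int) - i) + 1) 1).map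
            (fun t => rowDiffA ((PySem.List.pyGet? x (i - t)).getD [])
                               ((PySem.List.pyGet? x (i + t - 1)).getD []) n)).sum := by
        apply List.sum_nonneg
        intro y hy
        obtain ⟨t, _, rfl⟩ := List.mem_map.1 hy
        exact rowDiffA_nonneg _ _ _
      by_cases hbig : c + rowDiffA ((PySem.List.pyGet? x (i - j)).getD [])
          ((PySem.List.pyGet? x (i + j - 1)).getD []) n > 1
      · rw [if_pos hbig]
        simp only [Bool.true_eq_false, false_and, false_iff]
        omega
      · rw [if_neg hbig,
          ih (j + 1) _ (by omega) (by omega) (by omega)]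
        omega
    · rw [whileA_stop _ _ _ _ _ _ _ (by omega),
        PySem.List.pyRange_one_eq_nil (by omega)]
      simp only [List.map_nil, List.sum_nil, add_zero, true_and]

-- ---- per-pattern equality of the two line scorers ----

theorem maxLineA_eq_mirrorLineB (x : List (List Char)) (rl : Nat)
    (hrect : ∀ r ∈ x, r.length = rl)
    (hascii : ∀ r ∈ x, ∀ ch ∈ r, ch.toNat < 128) :
    maxLineA x (x.length : Int) (rl : Int) = mirrorLineB (x.map rowPlanes) := by
  unfold maxLineA mirrorLineB
  rw [List.length_map]
  apply PySem.List.foldl_congr_mem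
  intro acc i hmem
  rw [PySem.List.mem_pyRange_one] at hmem
  obtain ⟨hi1, hiL⟩ := hmem
  have hcond : ((whileA x (x.length : Int) (rl : Int) i ((x.length : Int).natAbs + 2) 1 0).2 = false ∧
      (whileA x (x.length : Int) (rl : Int) i ((x.length : Int).natAbs + 2) 1 0).1 = 1) ↔
      smudgesB (x.map rowPlanes) i = 1 := by
    rw [whileA_char x (rl : Int) i ((x.length : Int).natAbs + 2) 1 0 (by omega) (by omega) (by omega)]
    unfold smudgesB
    rw [PySem.List.foldl_add, List.length_map, zero_add, zero_add]
    have hmapeq : ((PySem.List.pyRange 1 (min i ((x.length : Int) - i) + 1) 1).map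
          (fun t => rowDiffA ((PySem.List.pyGet? x (i - t)).getD [])
                             ((PySem.List.pyGet? x (i + t - 1)).getD []) (rl : Int)))
        = ((PySem.List.pyRange 1 (min i ((x.length : Int) - i) + 1) 1).map
          (fun t => (PySem.Int.bitCount (diffPlanes
              (PySem.List.pyGetD (x.map rowPlanes) (i - t) [])
              (PySem.List.pyGetD (x.map rowPlanes) (i + t - 1) [])) : Int))) := by
      apply List.map_congr_left
      intro t ht
      rw [PySem.List.mem_pyRange_one] at ht
      have h1a : 0 ≤ i - t := by omega
      have h1b : i - t < (x.length : Int) := by omega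
      have h2a : 0 ≤ i + t - 1 := by omega
      have h2b : i + t - 1 < (x.length : Int) := by omega
      rw [PySem.List.pyGet?_eq_some_getElem x h1a h1b, PySem.List.pyGet?_eq_some_getElem x h2a h2b]
      simp only [Option.getD_some]
      rw [PySem.List.pyGetD_eq_getElem (x.map rowPlanes) [] h1a (by rw [List.length_map]; exact_mod_cast h1b),
          PySem.List.pyGetD_eq_getElem (x.map rowPlanes) [] h2a (by rw [List.length_map]; exact_mod_cast h2b)]
      rw [List.getElem_map, List.getElem_map]
      have e1 : x[(i - t).toNat] ∈ x := List.getElem_mem _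
      have e2 : x[(i + t - 1).toNat] ∈ x := List.getElem_mem _
      have hl1 := hrect _ e1
      have hl2 := hrect _ e2
      rw [diffPlanes_eq _ _ (by rw [hl1, hl2]) (hascii _ e1) (hascii _ e2)]
      rw [show (rl : Int) = (x[(i - t).toNat].length : Int) by rw [hl1]]
      rw [rowDiffA_eq_ham _ _ (by rw [hl1, hl2])]
      exact ham_eq_bitCount2 _ _ (by rw [hl1, hl2])
    rw [hmapeq]
  dsimp only
  exact if_congr hcond rfl rfl

-- ---- columns: zip(*x) really is the list of columns ----

theorem zipStar_eq_cols (n : Nat) :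
    ∀ (x : List (List Char)), x ≠ [] → (∀ r ∈ x, r.length = n) →
    zipStar x = (List.range n).map (fun c => x.map (fun r => r.getD c ' ')) := by
  induction n with
  | zero =>
    intro x hne hrect
    rw [zipStar, dif_pos]
    · simp
    · right
      cases x with
      | nil => simp at hne
      | cons r rs =>
        have h0 : r.length = 0 := hrect r List.mem_cons_self
        simp [List.eq_nil_of_length_eq_zero h0]
  | succ n ih =>
    intro x hne hrect
    rw [zipStar, dif_neg]
    · have htail : x.map (·.tail) ≠ [] := by simpa using hne
      have htrect : ∀ r ∈ x.map (·.tail), r.length = n := by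
        intro r hr
        obtain ⟨s, hs, rfl⟩ := List.mem_map.1 hr
        have := hrect s hs
        simp [List.length_tail, this]
      rw [ih _ htail htrect, List.range_succ_eq_map, List.map_cons, List.map_map]
      congr 1
      · apply List.map_congr_left
        intro r hr
        cases r with
        | nil => have := hrect _ hr; simp at this
        | cons a l => rfl
      · apply List.map_congr_left
        intro c _
        rw [List.map_map]
        apply List.map_congr_left
        intro r _
        cases r with
        | nil => rfl
        | cons a l => simp [Function.comp]
    · rintro (he | he)
      · rw [List.isEmpty_iff] at he
        exact hne he
      · rw [List.any_eq_true] at he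
        obtain ⟨r, hr, hre⟩ := he
        have := hrect r hr
        rw [List.isEmpty_iff] at hre
        simp [hre] at this

-- ===== VERDICT (by name: the statement is the Claim_ definition above) =====
theorem part_two_spec : Claim_equal_part_two := by
  unfold Claim_equal_part_two
  intro input_data hdom hpre
  unfold Spec_part_two part_two part_two_alt
  apply PySem.List.foldl_congr_mem
  intro total p hp
  obtain ⟨hne, hrows⟩ := hpre p hp
  have hasciiP : ∀ s ∈ p, ∀ ch ∈ s.toList, ch.toNat < 128 := by
    have hp' := List.all_eq_true.1 hdom _ hp
    intro s hs ch hch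
    have hs' := List.all_eq_true.1 hp' s hs
    have hc := List.all_eq_true.1 hs' ch hch
    unfold pvDomChar at hc
    simp at hc
    omega
  dsimp only
  set x := p.map String.toList with hx
  have hxne : x ≠ [] := by simpa [hx] using hne
  set n := (x.headD []).length with hn
  have hhead : x.headD [] = (p.headD "").toList := by
    cases p with
    | nil => exact absurd rfl hne
    | cons s ps => simp [hx]
  have hrect : ∀ r ∈ x, r.length = n := by
    intro r hr
    obtain ⟨s, hs, rfl⟩ := List.mem_map.1 hr
    rw [hn, hhead]
    exact hrows s hs
  have hascii : ∀ r ∈ x, ∀ ch ∈ r, ch.toNat < 128 := by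
    intro r hr
    obtain ⟨s, hs, rfl⟩ := List.mem_map.1 hr
    exact hasciiP s hs
  have hrow : maxLineA x (x.length : Int) (n : Int) = mirrorLineB (x.map rowPlanes) :=
    maxLineA_eq_mirrorLineB x n hrect hascii
  have hcols : zipStar x = (List.range n).map (fun c => x.map (fun r => r.getD c ' ')) :=
    zipStar_eq_cols n x hxne hrect
  have hlen_t : (zipStar x).length = n := by rw [hcols]; simp
  have htrect : ∀ r ∈ zipStar x, r.length = x.length := by
    intro r hr
    rw [hcols] at hr
    obtain ⟨c, _, rfl⟩ := List.mem_map.1 hr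
    simp
  have htascii : ∀ r ∈ zipStar x, ∀ ch ∈ r, ch.toNat < 128 := by
    intro r hr ch hch
    rw [hcols] at hr
    obtain ⟨c, hcmem, rfl⟩ := List.mem_map.1 hr
    rw [List.mem_map] at hch
    obtain ⟨s, hsmem, rfl⟩ := hch
    have hcn : c < s.length := by rw [hrect s hsmem]; exact List.mem_range.1 hcmem
    rw [List.getD_eq_getElem _ _ hcn]
    exact hascii s hsmem _ (List.getElem_mem _)
  have hcol : maxLineA (zipStar x) (n : Int) (x.length : Int)
      = mirrorLineB ((PySem.List.pyRange 0 (n : Int) 1).map (colPlanes x)) := by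
    have h1 : ((n : Int)) = ((zipStar x).length : Int) := by rw [hlen_t]
    have h2 := maxLineA_eq_mirrorLineB (zipStar x) x.length htrect htascii
    conv_lhs => rw [h1]
    rw [h2]
    congr 1
    rw [hcols, List.map_map, PySem.List.pyRange_zero_nat, List.map_map]
    apply List.map_congr_left
    intro c _
    simp only [Function.comp_apply]
    exact (colPlanes_eq_rowPlanes x c).symm
  rw [hrow, hcol]
  ring
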